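-- pv_equiv track=rewrite | github.com/voxel51/voxelgpt | links/view_stage_example_selector.py | _reduce_label_fields
-- ===== SOURCE A (Python) =====
-- def _count_empty_class_names(label_field):
--     return [
--         list(class_name.values())[0]
--         for class_name in label_field
--         ].count([])
--
-- def _reduce_label_fields(label_fields):
--     label_field_keys = list(label_fields.keys())
--     if len(label_field_keys) == 0:
--         return None, None
--     elif len(label_field_keys) > 0:
--         empty_counts = [
--             _count_empty_class_names(label_fields[key])
--             for key in label_field_keys
--         ]
--         min_empty_count = min(empty_counts)
--         valid_keys = [
--             key for key, count in zip(label_field_keys, empty_counts)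
--             if count == min_empty_count
--         ]
--         return {key: label_fields[key] for key in valid_keys}, min_empty_count
-- ===== SOURCE B (Python) =====
-- def _reduce_label_fields(label_fields):
--     result = {}
--     min_empty_count = None
--     for key, label_field in label_fields.items():
--         count = sum(1 for class_name in label_field
--                     if list(class_name.values())[0] == [])
--         if min_empty_count is None or count < min_empty_count:
--             min_empty_count = count
--             result = {key: label_field}
--         elif count == min_empty_count:
--             result[key] = label_field
--     if min_empty_count is None:
--         return None, None
--     return result, min_empty_count
-- ===== Notes on version B (the rewrite author's own statement) =====
-- stated objective: simpler
-- what changed: Replaces A's four passes (keys list, counts list, min(), filter, rebuild-dict-by-lookup) by one pass over the items that keeps a running minimum and an ordered dict of the winning keys, resetting on a strictly smaller count and appending on a tie; counting per field is an inline sum instead of build-list-then-.count.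
import Mathlib
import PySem

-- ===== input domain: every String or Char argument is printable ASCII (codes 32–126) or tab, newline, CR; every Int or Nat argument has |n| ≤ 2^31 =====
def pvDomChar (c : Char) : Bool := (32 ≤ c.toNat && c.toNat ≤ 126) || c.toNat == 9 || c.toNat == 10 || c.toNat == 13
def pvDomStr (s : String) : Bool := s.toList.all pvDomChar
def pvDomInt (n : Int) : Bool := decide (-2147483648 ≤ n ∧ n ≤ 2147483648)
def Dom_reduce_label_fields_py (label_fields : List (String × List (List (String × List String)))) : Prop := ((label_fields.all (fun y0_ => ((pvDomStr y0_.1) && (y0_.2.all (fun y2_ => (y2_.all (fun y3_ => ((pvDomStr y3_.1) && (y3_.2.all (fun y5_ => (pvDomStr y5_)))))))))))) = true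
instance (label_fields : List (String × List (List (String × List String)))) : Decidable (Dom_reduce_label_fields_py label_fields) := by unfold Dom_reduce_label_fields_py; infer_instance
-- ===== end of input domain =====

-- One line: B makes a single pass with a running minimum instead of A's keys/counts/min/filter/rebuild passes (objective: simpler).

-- ===== PORT A =====
-- list(class_name.values())[0] : the first value of the class_name dict; Pre_ guarantees the dict
-- is a valid nonempty association list, so pyGet? is some and .getD [] is never taken.
def count_empty_class_names_py (label_field : List (List (String × List String))) : Int :=
  ((label_field.map
      (fun class_name => (PySem.List.pyGet? (class_name.map (·.2)) 0).getD [])).count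
    ([] : List String) : Int)

def reduce_label_fields_py (label_fields : List (String × List (List (String × List String)))) : (Option (List (String × List (List (String × List String))))) × Option Int :=
  let label_field_keys := label_fields.map (·.1)
  if label_field_keys.length = 0 then (none, none)
  else
    let empty_counts := label_field_keys.map
      (fun key => count_empty_class_names_py ((PySem.Dict.mk label_fields).getD key []))
    let min_empty_count := (PySem.List.min? empty_counts (fun x => x)).getD 0
    let valid_keys := ((label_field_keys.zip empty_counts).filter
      (fun kc => kc.2 == min_empty_count)).map (·.1)
    (some (valid_keys.map
        (fun key => (key, (PySem.Dict.mk label_fields).getD key []))),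
      some min_empty_count)

-- ===== PORT B =====
def reduce_label_fields_py_alt (label_fields : List (String × List (List (String × List String)))) : (Option (List (String × List (List (String × List String))))) × Option Int :=
  let st := label_fields.foldl
    (fun (st : List (String × List (List (String × List String))) × Option Int) kv =>
      let count : Int := kv.2.foldl
        (fun acc class_name =>
          if (PySem.List.pyGet? (class_name.map (·.2)) 0).getD [] == ([] : List String)
          then acc + 1 else acc) 0
      match st.2 with
      | none => ([kv], some count)
      | some m =>
        if count < m then ([kv], some count)
        else if count == m then (st.1 ++ [kv], st.2)
        else st)
    ([], none)
  match st.2 with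
  | none => (none, none)
  | some m => (some st.1, some m)

-- ===== PRECONDITION & SPEC =====
-- Pre_ excludes (a) inputs containing an empty class_name dict, on which A raises IndexError at
-- list(class_name.values())[0], and (b) association lists with duplicate keys (at the top level or
-- inside a class_name dict), which do not correspond to any Python dict argument.
def Pre_reduce_label_fields_py (label_fields : List (String × List (List (String × List String)))) : Prop :=
  (label_fields.map (·.1)).Nodup ∧
  ∀ p ∈ label_fields, ∀ cn ∈ p.2, cn ≠ [] ∧ (cn.map (·.1)).Nodup

instance (label_fields : List (String × List (List (String × List String)))) : Decidable (Pre_reduce_label_fields_py label_fields) := by unfold Pre_reduce_label_fields_py; infer_instance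

def pvWitness_reduce_label_fields_py : (List (String × List (List (String × List String)))) :=
  [("ground_truth", [[("label", ["cat"])], [("label", [])]]), ("predictions", [[("label", [])]])]

def Spec_reduce_label_fields_py (label_fields : List (String × List (List (String × List String)))) (out : (Option (List (String × List (List (String × List String))))) × Option Int) : Prop := out = reduce_label_fields_py_alt label_fields
instance (label_fields : List (String × List (List (String × List String)))) (out : (Option (List (String × List (List (String × List String))))) × Option Int) : Decidable (Spec_reduce_label_fields_py label_fields out) := by
  unfold Spec_reduce_label_fields_py
  letI d1 : DecidableEq (String × List (List (String × List String))) := inferInstance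
  letI d2 : DecidableEq (List (String × List (List (String × List String)))) := instDecidableEqList
  letI d3 : DecidableEq (Option (List (String × List (List (String × List String))))) := Option.instDecidableEq
  exact instDecidableEqProd out (reduce_label_fields_py_alt label_fields)

-- ===== CLAIM (what is proved, stated in full; the proofs are below) =====
def Claim_equal_reduce_label_fields_py : Prop := ∀ (label_fields : List (String × List (List (String × List String)))), Dom_reduce_label_fields_py label_fields → Pre_reduce_label_fields_py label_fields → Spec_reduce_label_fields_py label_fields (reduce_label_fields_py label_fields)

-- ===== LEMMAS AND PROOFS =====

-- B's inner sum is A's helper count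
lemma count_fold (field : List (List (String × List String))) :
    field.foldl
      (fun acc class_name =>
        if (PySem.List.pyGet? (class_name.map (·.2)) 0).getD [] == ([] : List String)
        then acc + 1 else acc) (0 : Int)
    = count_empty_class_names_py field := by
  rw [PySem.List.foldl_if_add_one]
  simp [count_empty_class_names_py, List.count_eq_countP, List.countP_map]
  rfl

-- first-match lookup on a Nodup association list returns the pair's own value
lemma getD_mk_of_mem (l : List (String × List (List (String × List String))))
    (h : (l.map (·.1)).Nodup) (q : String × List (List (String × List String)))
    (hq : q ∈ l) : (PySem.Dict.mk l).getD q.1 [] = q.2 := by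
  induction l with
  | nil => cases hq
  | cons p t ih =>
    obtain ⟨k, v⟩ := p
    simp only [List.map_cons, List.nodup_cons, List.mem_map] at h
    rcases List.mem_cons.mp hq with rfl | hq'
    · simp [PySem.Dict.getD, PySem.Dict.get?_mk_cons]
    · have hne : (k == q.1) = false := by
        simp only [beq_eq_false_iff_ne]
        intro he
        exact h.1 ⟨q, hq', he.symm⟩
      have : (PySem.Dict.mk ((k, v) :: t)).get? q.1 = (PySem.Dict.mk t).get? q.1 := by
        rw [PySem.Dict.get?_mk_cons, hne]
        simp
      simp only [PySem.Dict.getD, this]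
      exact ih h.2 hq'

-- characterisation of B's fold from a live state (function written as the goal displays it)
lemma foldB_some (l : List (String × List (List (String × List String))))
    (acc : List (String × List (List (String × List String)))) (m : Int) :
    l.foldl
      (fun (st : List (String × List (List (String × List String))) × Option Int) kv =>
        match st.2 with
        | none => ([kv], some (count_empty_class_names_py kv.2))
        | some m =>
          if count_empty_class_names_py kv.2 < m then ([kv], some (count_empty_class_names_py kv.2))
          else if count_empty_class_names_py kv.2 == m then (st.1 ++ [kv], st.2)
          else st)
      (acc, some m)
    = ((if (l.map (fun q => count_empty_class_names_py q.2)).foldl min m = m then acc else [])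
         ++ l.filter (fun q => count_empty_class_names_py q.2 ==
              (l.map (fun q => count_empty_class_names_py q.2)).foldl min m),
       some ((l.map (fun q => count_empty_class_names_py q.2)).foldl min m)) := by
  induction l generalizing acc m with
  | nil => simp
  | cons p t ih =>
    simp only [List.foldl_cons, List.map_cons]
    rcases lt_trichotomy (count_empty_class_names_py p.2) m with hlt | heq | hgt
    · have h1 : min m (count_empty_class_names_py p.2) = count_empty_class_names_py p.2 := by omega
      have hm' : (t.map (fun q => count_empty_class_names_py q.2)).foldl min
          (count_empty_class_names_py p.2) ≤ count_empty_class_names_py p.2 :=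
        (PySem.List.foldl_min_le _ _).1
      rw [if_pos hlt]
      rw [ih]
      simp only [h1]
      have hne : ¬ ((t.map (fun q => count_empty_class_names_py q.2)).foldl min
          (count_empty_class_names_py p.2) = m) := by omega
      rw [if_neg hne]
      congr 1
      rw [List.filter_cons]
      by_cases hc : (t.map (fun q => count_empty_class_names_py q.2)).foldl min
          (count_empty_class_names_py p.2) = count_empty_class_names_py p.2
      · simp [hc]
      · have : ¬ ((count_empty_class_names_py p.2 ==
            (t.map (fun q => count_empty_class_names_py q.2)).foldl min
              (count_empty_class_names_py p.2)) = true) := by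
          simp only [beq_iff_eq]
          intro h; exact hc h.symm
        simp [this, hc]
    · have h1 : min m (count_empty_class_names_py p.2) = m := by omega
      rw [if_neg (by omega), if_pos (by simp [heq])]
      rw [ih]
      simp only [h1]
      have hle : (t.map (fun q => count_empty_class_names_py q.2)).foldl min m ≤ m :=
        (PySem.List.foldl_min_le _ _).1
      congr 1
      rw [List.filter_cons]
      by_cases hc : (t.map (fun q => count_empty_class_names_py q.2)).foldl min m = m
      · simp [hc, heq]
      · have : ¬ ((count_empty_class_names_py p.2 ==
            (t.map (fun q => count_empty_class_names_py q.2)).foldl min m) = true) := by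
          simp only [beq_iff_eq]; omega
        simp [this, hc]
    · have h1 : min m (count_empty_class_names_py p.2) = m := by omega
      rw [if_neg (by omega), if_neg (by simp only [beq_iff_eq]; omega)]
      rw [ih]
      simp only [h1]
      have hle : (t.map (fun q => count_empty_class_names_py q.2)).foldl min m ≤ m :=
        (PySem.List.foldl_min_le _ _).1
      congr 1
      rw [List.filter_cons]
      have : ¬ ((count_empty_class_names_py p.2 ==
          (t.map (fun q => count_empty_class_names_py q.2)).foldl min m) = true) := by
        simp only [beq_iff_eq]; omega
      simp [this]

-- ===== VERDICT (by name: the statement is the Claim_ definition above) =====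
theorem reduce_label_fields_py_spec : Claim_equal_reduce_label_fields_py := by
  intro label_fields _hDom hPre
  unfold Spec_reduce_label_fields_py
  obtain ⟨hnd, _hcn⟩ := hPre
  cases label_fields with
  | nil => rfl
  | cons p t =>
    unfold reduce_label_fields_py reduce_label_fields_py_alt
    simp only [List.foldl_cons, count_fold, List.length_cons, List.map_cons]
    rw [if_neg (by omega)]
    have hget : ∀ q ∈ p :: t, (PySem.Dict.mk (p :: t)).getD q.1 [] = q.2 :=
      fun q hq => getD_mk_of_mem _ hnd q hq
    have hcounts :
        (t.map (fun x => x.1)).map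
            (fun key => count_empty_class_names_py ((PySem.Dict.mk (p :: t)).getD key [])) =
          t.map (fun q => count_empty_class_names_py q.2) := by
      rw [List.map_map]
      exact List.map_congr_left (fun q hq => by
        simp only [Function.comp_apply, hget q (List.mem_cons_of_mem p hq)])
    have hp : (PySem.Dict.mk (p :: t)).getD p.1 [] = p.2 := hget p (List.mem_cons_self ..)
    rw [hcounts, hp, foldB_some, PySem.List.min?_id_cons]
    simp only [Option.getD_some]
    have hMle : (t.map (fun q => count_empty_class_names_py q.2)).foldl min
        (count_empty_class_names_py p.2) ≤ count_empty_class_names_py p.2 :=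
      (PySem.List.foldl_min_le _ _).1
    set M := (t.map (fun q => count_empty_class_names_py q.2)).foldl min
      (count_empty_class_names_py p.2) with hMdef
    have hzip : (p.1 :: (t.map (fun x => x.1))).zip
        (count_empty_class_names_py p.2 :: t.map (fun q => count_empty_class_names_py q.2)) =
        (p :: t).map (fun q => (q.1, count_empty_class_names_py q.2)) := by
      simp [List.zip_cons_cons, List.zip_map']
    rw [hzip, List.filter_map, List.map_map, List.map_map]
    simp only [Function.comp_def]
    have hid : ((p :: t).filter (fun q => count_empty_class_names_py q.2 == M)).map
        (fun q : String × List (List (String × List String)) =>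
          (q.1, (PySem.Dict.mk (p :: t)).getD q.1 [])) =
        (p :: t).filter (fun q => count_empty_class_names_py q.2 == M) := by
      rw [List.map_congr_left (g := id) (fun q hq => by
        rw [hget q (List.mem_of_mem_filter hq)]; rfl)]
      exact List.map_id _
    rw [hid, List.filter_cons]
    by_cases hc : M = count_empty_class_names_py p.2
    · simp [hc]
    · have : ¬ ((count_empty_class_names_py p.2 == M) = true) := by
        simp only [beq_iff_eq]
        intro h; exact hc h.symm
      simp [this, hc]
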